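-- pv_equiv track=rewrite | github.com/crixodia/aoc | 2015/15_science_for_hungry_people/main.py | get_calories
-- ===== SOURCE A (Python) =====
-- def get_calories(ingredients, weights):
--     capacity = 0
--     durability = 0
--     flavor = 0
--     texture = 0
--     calories = 0
--
--     for i, ing in enumerate(list(ingredients.keys())):
--         capacity += weights[i] * ingredients[ing]["capacity"]
--         durability += weights[i] * ingredients[ing]["durability"]
--         flavor += weights[i] * ingredients[ing]["flavor"]
--         texture += weights[i] * ingredients[ing]["texture"]
--         calories += weights[i] * ingredients[ing]["calories"]
--
--     score = capacity * durability * flavor * texture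
--     if min([capacity, durability, flavor, texture]) < 0:
--         score = 0
--
--     return calories, score
-- ===== SOURCE B (Python) =====
-- def get_calories(ingredients, weights):
--     vals = list(ingredients.values())
--
--     def total(prop):
--         return sum(weights[i] * ing[prop] for i, ing in enumerate(vals))
--
--     capacity = total("capacity")
--     durability = total("durability")
--     flavor = total("flavor")
--     texture = total("texture")
--     calories = total("calories")
--
--     score = 0 if min(capacity, durability, flavor, texture) < 0 \
--         else capacity * durability * flavor * texture
--     return calories, score
-- ===== Notes on version B (the rewrite author's own statement) =====
-- stated objective: simpler
-- what changed: A's single fused loop carrying five running accumulators is replaced by one reusable per-property reduction (a total(prop) helper summing weights[i]*ing[prop] over the ingredient values), called once for each of the five properties, with the score computed from the five sums.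
import Mathlib
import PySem

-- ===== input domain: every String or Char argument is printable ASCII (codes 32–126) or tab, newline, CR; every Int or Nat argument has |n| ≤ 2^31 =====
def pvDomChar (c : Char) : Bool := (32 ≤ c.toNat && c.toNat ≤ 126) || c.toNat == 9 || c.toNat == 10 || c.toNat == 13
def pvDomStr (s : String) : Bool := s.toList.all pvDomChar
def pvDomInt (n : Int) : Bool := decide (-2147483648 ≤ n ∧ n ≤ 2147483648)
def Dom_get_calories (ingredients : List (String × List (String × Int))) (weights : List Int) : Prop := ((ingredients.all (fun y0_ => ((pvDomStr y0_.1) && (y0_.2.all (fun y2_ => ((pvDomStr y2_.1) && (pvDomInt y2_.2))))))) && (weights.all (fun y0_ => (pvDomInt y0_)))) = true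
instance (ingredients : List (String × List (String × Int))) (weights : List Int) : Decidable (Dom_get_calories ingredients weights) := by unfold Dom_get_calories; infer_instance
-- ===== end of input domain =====

-- B replaces A's single fused five-accumulator loop by one reusable per-property reduction
-- (five independent sums over the ingredient values); objective: simpler, same cost.

-- ===== PORT A =====
-- A: one loop over enumerate(ingredients.keys()) updating five accumulators, then the score.
def get_calories (ingredients : List (String × List (String × Int))) (weights : List Int) : Int × Int :=
  -- the Python arguments are dicts: build them with Python's duplicate-collapsing semantics
  let d : PySem.Dict String (List (String × Int)) := PySem.Dict.ofList ingredients
  let st := (PySem.List.enumerate d.keys).foldl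
    (fun (acc : Int × Int × Int × Int × Int) iing =>
      let w := PySem.List.pyGetD weights iing.1 0   -- weights[i]; Pre_ keeps i in range
      let props := PySem.Dict.ofList (d.getD iing.2 [])   -- ingredients[ing] (inner dict)
      (acc.1 + w * props.getD "capacity" 0,           -- getD is exact under Pre_ (key present)
       acc.2.1 + w * props.getD "durability" 0,
       acc.2.2.1 + w * props.getD "flavor" 0,
       acc.2.2.2.1 + w * props.getD "texture" 0,
       acc.2.2.2.2 + w * props.getD "calories" 0))
    (0, 0, 0, 0, 0)
  let score := st.1 * st.2.1 * st.2.2.1 * st.2.2.2.1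
  -- min([capacity, durability, flavor, texture]): a nonempty Int list's min is the left fold
  -- of binary min (exact: Python returns the first minimum, but tied Ints are equal)
  let score := if [st.2.1, st.2.2.1, st.2.2.2.1].foldl min st.1 < 0 then 0 else score
  (st.2.2.2.2, score)

-- ===== PORT B =====
-- B's helper total(prop): one per-property reduction over the ingredient values.
def pvTotal (vals : List (List (String × Int))) (weights : List Int) (prop : String) : Int :=
  ((PySem.List.enumerate vals).map
    (fun iv => PySem.List.pyGetD weights iv.1 0 * (PySem.Dict.ofList iv.2).getD prop 0)).sum

def get_calories_alt (ingredients : List (String × List (String × Int))) (weights : List Int) : Int × Int :=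
  let vals := (PySem.Dict.ofList ingredients).values
  let capacity := pvTotal vals weights "capacity"
  let durability := pvTotal vals weights "durability"
  let flavor := pvTotal vals weights "flavor"
  let texture := pvTotal vals weights "texture"
  let calories := pvTotal vals weights "calories"
  let score := if min (min (min capacity durability) flavor) texture < 0 then 0
               else capacity * durability * flavor * texture
  (calories, score)

-- ===== PRECONDITION & SPEC =====
-- Pre_ excludes exactly the inputs where the Python A raises: a weights list shorter than the
-- (duplicate-collapsed) ingredient dict (IndexError), and an ingredient dict value missing one of
-- the five property keys (KeyError).
def Pre_get_calories (ingredients : List (String × List (String × Int))) (weights : List Int) : Prop :=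
  (PySem.Dict.ofList ingredients).size ≤ weights.length ∧
  ∀ props ∈ (PySem.Dict.ofList ingredients).values,
    ∀ p ∈ ["capacity", "durability", "flavor", "texture", "calories"], p ∈ props.map Prod.fst
instance (ingredients : List (String × List (String × Int))) (weights : List Int) : Decidable (Pre_get_calories ingredients weights) := by unfold Pre_get_calories; infer_instance

def pvWitness_get_calories : (List (String × List (String × Int))) × List Int :=
  ([("Butterscotch", [("capacity", -1), ("durability", -2), ("flavor", 6), ("texture", 3), ("calories", 8)]),
    ("Cinnamon", [("capacity", 2), ("durability", 3), ("flavor", -2), ("texture", -1), ("calories", 3)])],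
   [44, 56])

def Spec_get_calories (ingredients : List (String × List (String × Int))) (weights : List Int) (out : Int × Int) : Prop := out = get_calories_alt ingredients weights
instance (ingredients : List (String × List (String × Int))) (weights : List Int) (out : Int × Int) : Decidable (Spec_get_calories ingredients weights out) := by unfold Spec_get_calories; infer_instance

-- ===== CLAIM (what is proved, stated in full; the proofs are below) =====
def Claim_equal_get_calories : Prop := ∀ (ingredients : List (String × List (String × Int))) (weights : List Int), Dom_get_calories ingredients weights → Pre_get_calories ingredients weights → Spec_get_calories ingredients weights (get_calories ingredients weights)

-- ===== LEMMAS AND PROOFS =====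

-- enumerate distributes over map (specific bridge between A's key loop and B's value loop)
theorem pv_enumerate_map {α β : Type} (l : List α) (g : α → β) (s : Int) :
    PySem.List.enumerate (l.map g) s = (PySem.List.enumerate l s).map (fun p => (p.1, g p.2)) := by
  induction l generalizing s with
  | nil => simp [PySem.List.enumerate]
  | cons x t ih => simp [PySem.List.enumerate, ih]

-- A's fused five-accumulator fold is the tuple of the five separate sums
theorem pv_fold5 {ι : Type} (L : List ι) (c du fl te ca : ι → Int) (a b e f g : Int) :
    L.foldl (fun (acc : Int × Int × Int × Int × Int) x =>
        (acc.1 + c x, acc.2.1 + du x, acc.2.2.1 + fl x, acc.2.2.2.1 + te x, acc.2.2.2.2 + ca x))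
      (a, b, e, f, g)
    = (a + (L.map c).sum, b + (L.map du).sum, e + (L.map fl).sum,
       f + (L.map te).sum, g + (L.map ca).sum) := by
  induction L generalizing a b e f g with
  | nil => simp
  | cons x t ih => simp [List.foldl_cons, ih, add_assoc]

theorem pv_ports_agree (ingredients : List (String × List (String × Int))) (weights : List Int) :
    get_calories ingredients weights = get_calories_alt ingredients weights := by
  unfold get_calories get_calories_alt pvTotal
  dsimp only
  have hnd := PySem.Dict.nodup_keys_ofList (κ := String) (ν := List (String × Int)) ingredients
  rw [PySem.Dict.values_eq_map_keys _ hnd []]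
  rw [pv_enumerate_map]
  simp only [List.map_map]
  rw [pv_fold5]
  simp only [zero_add, List.foldl_cons, List.foldl_nil]
  rfl

-- ===== VERDICT (by name: the statement is the Claim_ definition above) =====
theorem get_calories_spec : Claim_equal_get_calories := by
  intro ingredients weights _ _
  unfold Spec_get_calories
  exact pv_ports_agree ingredients weights
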